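-- pv_equiv track=rewrite | github.com/dmascardo/STEMboomerang | backend/processing/heuristics.py | guess_degree_and_school
-- ===== SOURCE A (Python) =====
-- from typing import Any, List, Optional, Tuple, Dict
--
-- def guess_degree_and_school(text: str) -> Tuple[Optional[str], Optional[str]]:
--     if not text:
--         return None, None
--
--     degree_keywords = [
--         "bachelor",
--         "b.sc",
--         "bs",
--         "b.s",
--         "master",
--         "m.sc",
--         "ms",
--         "m.s",
--         "phd",
--         "doctor",
--         "associate",
--     ]
--     lines = [ln.strip() for ln in text.splitlines() if ln.strip()]
--
--     school = None
--     degree = None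
--
--     for ln in lines[:160]:
--         low = ln.lower()
--         if not school and (
--             "university" in low or "college" in low or "institute" in low
--         ):
--             school = ln[:140].strip()
--         if not degree and any(k in low for k in degree_keywords):
--             degree = ln[:180].strip()
--         if school and degree:
--             break
--
--     return degree, school
-- ===== SOURCE B (Python) =====
-- from typing import Optional, Tuple
--
--
-- def guess_degree_and_school(text: str) -> Tuple[Optional[str], Optional[str]]:
--     if not text:
--         return None, None
--
--     degree_keywords = [
--         "bachelor",
--         "b.sc",
--         "bs",
--         "b.s",
--         "master",
--         "m.sc",
--         "ms",
--         "m.s",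
--         "phd",
--         "doctor",
--         "associate",
--     ]
--     school_keywords = ("university", "college", "institute")
--
--     lines = [ln.strip() for ln in text.splitlines() if ln.strip()][:160]
--
--     school = next(
--         (ln[:140].strip() for ln in lines
--          if any(w in ln.lower() for w in school_keywords)),
--         None,
--     )
--     degree = next(
--         (ln[:180].strip() for ln in lines
--          if any(k in ln.lower() for k in degree_keywords)),
--         None,
--     )
--     return degree, school
-- ===== Notes on version B (the rewrite author's own statement) =====
-- stated objective: simpler
-- what changed: Replaced the single stateful loop with early break that maintains both fields at once by two independent first-match scans (next over a generator) of the prepared lines list.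
import Mathlib
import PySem

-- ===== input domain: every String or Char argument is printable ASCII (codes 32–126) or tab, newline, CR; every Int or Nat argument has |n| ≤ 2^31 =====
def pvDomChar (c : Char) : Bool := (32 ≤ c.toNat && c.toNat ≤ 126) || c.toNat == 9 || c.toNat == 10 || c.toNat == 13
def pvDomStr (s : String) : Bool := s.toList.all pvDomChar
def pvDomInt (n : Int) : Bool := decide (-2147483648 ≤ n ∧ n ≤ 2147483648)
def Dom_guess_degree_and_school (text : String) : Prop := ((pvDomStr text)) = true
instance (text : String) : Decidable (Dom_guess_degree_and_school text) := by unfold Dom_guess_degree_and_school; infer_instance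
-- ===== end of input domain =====

-- B replaces A's single stateful scan (two accumulators + early break) by two independent
-- first-match scans of the prepared lines list; objective: simpler. Return values proved equal.

-- ===== PORT A =====
def pvDegreeKeywords : List String :=
  ["bachelor", "b.sc", "bs", "b.s", "master", "m.sc", "ms", "m.s", "phd", "doctor", "associate"]

-- Python truthiness of an Optional[str]: falsy iff None or the empty string
def pvFalsy (o : Option String) : Bool :=
  match o with
  | none => true
  | some s => s == ""

-- the 'for ln in lines[:160]: …' loop of A, with its two accumulators and early break
def pvLoopA : List String → Option String → Option String → Option String × Option String
  | [], school, degree => (degree, school)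
  | ln :: rest, school, degree =>
    let low := PySem.Str.lower ln
    let school1 :=
      if pvFalsy school &&
          (PySem.Str.isIn "university" low || PySem.Str.isIn "college" low ||
            PySem.Str.isIn "institute" low) then
        some (PySem.Str.strip (PySem.Str.slice ln none (some 140)))
      else school
    let degree1 :=
      if pvFalsy degree && pvDegreeKeywords.any (fun k => PySem.Str.isIn k low) then
        some (PySem.Str.strip (PySem.Str.slice ln none (some 180)))
      else degree
    if !pvFalsy school1 && !pvFalsy degree1 then (degree1, school1)
    else pvLoopA rest school1 degree1

def guess_degree_and_school (text : String) : Option String × Option String :=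
  if text = "" then (none, none)
  else
    let lines :=
      ((PySem.Str.splitlines text).filter (fun ln => !(PySem.Str.strip ln == ""))).map
        PySem.Str.strip
    pvLoopA (PySem.List.slice lines none (some 160)) none none

-- ===== PORT B =====
def pvSchoolKeywordsB : List String := ["university", "college", "institute"]

def pvDegreeKeywordsB : List String :=
  ["bachelor", "b.sc", "bs", "b.s", "master", "m.sc", "ms", "m.s", "phd", "doctor", "associate"]

def pvSchHit (ln : String) : Bool :=
  pvSchoolKeywordsB.any (fun w => PySem.Str.isIn w (PySem.Str.lower ln))

def pvDegHit (ln : String) : Bool :=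
  pvDegreeKeywordsB.any (fun k => PySem.Str.isIn k (PySem.Str.lower ln))

def guess_degree_and_school_alt (text : String) : Option String × Option String :=
  if text = "" then (none, none)
  else
    let lines :=
      PySem.List.slice
        (((PySem.Str.splitlines text).map PySem.Str.strip).filter (fun s => !(s == "")))
        none (some 160)
    let school :=
      (lines.find? pvSchHit).map (fun ln => PySem.Str.strip (PySem.Str.slice ln none (some 140)))
    let degree :=
      (lines.find? pvDegHit).map (fun ln => PySem.Str.strip (PySem.Str.slice ln none (some 180)))
    (degree, school)

-- ===== PRECONDITION & SPEC =====
def Spec_guess_degree_and_school (text : String) (out : Option String × Option String) : Prop := out = guess_degree_and_school_alt text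
instance (text : String) (out : Option String × Option String) : Decidable (Spec_guess_degree_and_school text out) := by unfold Spec_guess_degree_and_school; infer_instance

-- ===== CLAIM (what is proved, stated in full; the proofs are below) =====
def Claim_equal_guess_degree_and_school : Prop := ∀ (text : String), Dom_guess_degree_and_school text → Spec_guess_degree_and_school text (guess_degree_and_school text)

-- ===== LEMMAS AND PROOFS =====

-- a nonempty strip result starts with a non-space character
lemma pv_strip_head (t : List Char) (h : PySem.Chars.strip t ≠ []) :
    ∃ c cs, PySem.Chars.strip t = c :: cs ∧ PySem.Chars.isspace c = false := by
  cases hst : PySem.Chars.strip t with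
  | nil => exact absurd hst h
  | cons c cs =>
    refine ⟨c, cs, rfl, ?_⟩
    have hpref : PySem.Chars.strip t <+: PySem.Chars.lstrip t := by
      have hsuf : (PySem.Chars.lstrip t).reverse.dropWhile PySem.Chars.isspace <:+
          (PySem.Chars.lstrip t).reverse := List.dropWhile_suffix _
      have : (PySem.Chars.strip t).reverse <:+ (PySem.Chars.lstrip t).reverse := by
        simpa [PySem.Chars.strip, PySem.Chars.rstrip] using hsuf
      exact List.reverse_suffix.mp this
    rw [hst] at hpref
    obtain ⟨u, hu⟩ := hpref
    have hdw : List.dropWhile PySem.Chars.isspace t = c :: (cs ++ u) := by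
      simpa [PySem.Chars.lstrip] using hu.symm
    have hw : List.dropWhile PySem.Chars.isspace t ≠ [] := by rw [hdw]; simp
    have hhd := List.head_dropWhile_not PySem.Chars.isspace hw
    simp only [hdw, List.head_cons] at hhd
    exact hhd

-- stripping a list headed by a non-space character never yields []
lemma pv_strip_cons_ne_nil (c : Char) (v : List Char) (hc : PySem.Chars.isspace c = false) :
    PySem.Chars.strip (c :: v) ≠ [] := by
  have hl : PySem.Chars.lstrip (c :: v) = c :: v := by
    simp [PySem.Chars.lstrip, hc]
  intro hnil
  rw [PySem.Chars.strip, hl, PySem.Chars.rstrip, List.reverse_eq_nil_iff,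
    List.dropWhile_eq_nil_iff] at hnil
  have := hnil c (by simp)
  simp [hc] at this

-- re-stripping a nonempty prefix of an already-stripped line never yields []
lemma pv_strip_take_ne_nil (t : List Char) (n : Nat) (hn : n ≠ 0)
    (h : PySem.Chars.strip t ≠ []) :
    PySem.Chars.strip ((PySem.Chars.strip t).take n) ≠ [] := by
  obtain ⟨c, cs, hst, hc⟩ := pv_strip_head t h
  obtain ⟨m, rfl⟩ := Nat.exists_eq_succ_of_ne_zero hn
  rw [hst, List.take_succ_cons]
  exact pv_strip_cons_ne_nil c _ hc

-- the String-level form used by the loop lemma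
lemma pv_line_good (ln₀ : String) (h : PySem.Str.strip ln₀ ≠ "") (n : Nat) (hn : n ≠ 0) :
    PySem.Str.strip (PySem.Str.slice (PySem.Str.strip ln₀) none (some (n : Int))) ≠ "" := by
  rw [Ne, ← String.toList_eq_nil_iff]
  have hchars : PySem.Chars.strip ln₀.toList ≠ [] := by
    rw [← PySem.Str.toList_strip, Ne, String.toList_eq_nil_iff]; exact h
  have hsl : (PySem.Str.slice (PySem.Str.strip ln₀) none (some (n : Int))).toList
      = (PySem.Chars.strip ln₀.toList).take n := by
    rw [PySem.Str.toList_slice, PySem.Str.toList_strip]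
    simp [pysem]
  rw [PySem.Str.toList_strip, hsl]
  exact pv_strip_take_ne_nil _ n hn hchars

-- pvFalsy on a state that is none or a nonempty string is Option.isNone
lemma pv_falsy_eq (o : Option String) (ho : ∀ s, o = some s → s ≠ "") :
    pvFalsy o = o.isNone := by
  cases o with
  | none => rfl
  | some s => simp [pvFalsy, ho s rfl]

-- Characterisation of A's loop: on states holding only nonempty strings, it returns the
-- pair of first matches that B computes directly.
lemma pvLoopA_eq (lines : List String)
    (hgood : ∀ ln ∈ lines,
      PySem.Str.strip (PySem.Str.slice ln none (some 140)) ≠ "" ∧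
      PySem.Str.strip (PySem.Str.slice ln none (some 180)) ≠ "")
    (school degree : Option String)
    (hs : ∀ s, school = some s → s ≠ "") (hd : ∀ s, degree = some s → s ≠ "") :
    pvLoopA lines school degree =
      (degree.or ((lines.find? pvDegHit).map
          (fun ln => PySem.Str.strip (PySem.Str.slice ln none (some 180)))),
        school.or ((lines.find? pvSchHit).map
          (fun ln => PySem.Str.strip (PySem.Str.slice ln none (some 140))))) := by
  induction lines generalizing school degree with
  | nil => simp [pvLoopA]
  | cons ln rest ih =>
    have hg := hgood ln (by simp)
    have hgr : ∀ l ∈ rest,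
        PySem.Str.strip (PySem.Str.slice l none (some 140)) ≠ "" ∧
        PySem.Str.strip (PySem.Str.slice l none (some 180)) ≠ "" :=
      fun l hl => hgood l (by simp [hl])
    have hSch : (PySem.Str.isIn "university" (PySem.Str.lower ln) ||
        PySem.Str.isIn "college" (PySem.Str.lower ln) ||
        PySem.Str.isIn "institute" (PySem.Str.lower ln)) = pvSchHit ln := by
      simp [pvSchHit, pvSchoolKeywordsB, Bool.or_assoc]
    have hDeg : pvDegreeKeywords.any (fun k => PySem.Str.isIn k (PySem.Str.lower ln))
        = pvDegHit ln := by
      simp [pvDegHit, pvDegreeKeywords, pvDegreeKeywordsB]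
    have hschool1 : ∀ s,
        (if school.isNone && pvSchHit ln then
            some (PySem.Str.strip (PySem.Str.slice ln none (some 140))) else school)
          = some s → s ≠ "" := by
      intro s hsome
      by_cases hcond : school.isNone && pvSchHit ln
      · simp [hcond] at hsome; subst hsome; exact hg.1
      · simp [hcond] at hsome; exact hs s hsome
    have hdegree1 : ∀ s,
        (if degree.isNone && pvDegHit ln then
            some (PySem.Str.strip (PySem.Str.slice ln none (some 180))) else degree)
          = some s → s ≠ "" := by
      intro s hsome
      by_cases hcond : degree.isNone && pvDegHit ln
      · simp [hcond] at hsome; subst hsome; exact hg.2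
      · simp [hcond] at hsome; exact hd s hsome
    have hrec := ih hgr _ _ hschool1 hdegree1
    rw [pvLoopA]
    simp only [pv_falsy_eq school hs, pv_falsy_eq degree hd, hSch, hDeg,
      pv_falsy_eq _ hschool1, pv_falsy_eq _ hdegree1]
    cases school with
    | some s =>
      cases degree with
      | some d => simp
      | none =>
        by_cases hD : pvDegHit ln = true
        · simp [hD, List.find?_cons_of_pos hD]
        · simp [hD] at hrec
          simp [hD, List.find?_cons_of_neg hD, hrec]
    | none =>
      cases degree with
      | some d =>
        by_cases hS : pvSchHit ln = true
        · simp [hS, List.find?_cons_of_pos hS]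
        · simp [hS] at hrec
          simp [hS, List.find?_cons_of_neg hS, hrec]
      | none =>
        by_cases hS : pvSchHit ln = true <;> by_cases hD : pvDegHit ln = true
        · simp [hS, hD, List.find?_cons_of_pos hS, List.find?_cons_of_pos hD]
        · simp [hS, hD] at hrec
          simp [hS, hD, List.find?_cons_of_pos hS, List.find?_cons_of_neg hD, hrec]
        · simp [hS, hD] at hrec
          simp [hS, hD, List.find?_cons_of_neg hS, List.find?_cons_of_pos hD, hrec]
        · simp [hS, hD] at hrec
          simp [hS, hD, List.find?_cons_of_neg hS, List.find?_cons_of_neg hD, hrec]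

-- ===== VERDICT (by name: the statement is the Claim_ definition above) =====
theorem guess_degree_and_school_spec : Claim_equal_guess_degree_and_school := by
  intro text _
  unfold Spec_guess_degree_and_school guess_degree_and_school guess_degree_and_school_alt
  by_cases htext : text = ""
  · simp [htext]
  · simp only [if_neg htext]
    have hlines :
        (((PySem.Str.splitlines text).map PySem.Str.strip).filter (fun s => !(s == ""))) =
        ((PySem.Str.splitlines text).filter (fun ln => !(PySem.Str.strip ln == ""))).map
          PySem.Str.strip := by
      rw [List.filter_map]
      rfl
    rw [hlines]
    have hgood : ∀ ln ∈ PySem.List.slice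
        (((PySem.Str.splitlines text).filter (fun ln => !(PySem.Str.strip ln == ""))).map
          PySem.Str.strip) none (some 160),
        PySem.Str.strip (PySem.Str.slice ln none (some 140)) ≠ "" ∧
        PySem.Str.strip (PySem.Str.slice ln none (some 180)) ≠ "" := by
      intro ln hln
      have hmem := PySem.List.mem_of_mem_slice _ _ _ hln
      obtain ⟨ln₀, hln₀, rfl⟩ := List.mem_map.mp hmem
      have hne : PySem.Str.strip ln₀ ≠ "" := by
        have := (List.mem_filter.mp hln₀).2
        simpa using this
      exact ⟨pv_line_good ln₀ hne 140 (by norm_num),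
        pv_line_good ln₀ hne 180 (by norm_num)⟩
    rw [pvLoopA_eq _ hgood none none (by intro s h; cases h) (by intro s h; cases h)]
    simp
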